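-- pv_equiv track=rewrite | github.com/cgokce/591-source | leetcode/problems/Array/561.py | arrayPairSum
-- ===== SOURCE A (Python) =====
-- from typing import List
--
-- def arrayPairSum(nums: List[int]) -> int:
--
--     nums.sort()
--     ret = 0
--     i = 0
--
--     while (i<len(nums)):
--         ret += nums[i]
--         i+=2
--
--     return ret
-- ===== SOURCE B (Python) =====
-- def arrayPairSum(nums):
--     counts = {}
--     for x in nums:
--         counts[x] = counts.get(x, 0) + 1
--     total = 0
--     idx = 0
--     for v in sorted(counts):
--         c = counts[v]
--         evens = (c + (1 if idx % 2 == 0 else 0)) // 2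
--         total += v * evens
--         idx += c
--     return total
-- ===== Notes on version B (the rewrite author's own statement) =====
-- stated objective: alternative
-- what changed: Replaces sort-the-list-and-sum-every-other-element with a frequency dictionary: iterate once to count, then walk the sorted distinct values and add value * (number of even global positions its run covers), computed arithmetically from the running position parity.
import Mathlib
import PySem

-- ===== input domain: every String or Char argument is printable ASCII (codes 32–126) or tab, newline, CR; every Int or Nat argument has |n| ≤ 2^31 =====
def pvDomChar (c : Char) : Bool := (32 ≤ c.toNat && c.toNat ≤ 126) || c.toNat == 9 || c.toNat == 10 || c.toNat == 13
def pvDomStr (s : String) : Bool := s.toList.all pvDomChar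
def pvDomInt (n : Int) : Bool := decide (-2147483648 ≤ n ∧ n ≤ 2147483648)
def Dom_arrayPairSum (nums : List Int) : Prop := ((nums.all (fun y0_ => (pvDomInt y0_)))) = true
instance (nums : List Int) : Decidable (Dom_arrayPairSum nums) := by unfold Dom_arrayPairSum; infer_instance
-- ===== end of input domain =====

-- B replaces sort-then-sum-every-other-element by a frequency dictionary walked over the sorted distinct
-- values with a parity computation (alternative algorithm, same result); A sorts `nums` in place (a
-- caller-visible mutation) while B does not: the equivalence proved here is about the return value only.

-- ===== PORT A =====
-- the `while (i < len(nums)): ret += nums[i]; i += 2` loop of A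
def pvAWhile (s : List Int) (ret : Int) (i : Nat) : Int :=
  if h : i < s.length then pvAWhile s (ret + s[i]) (i + 2) else ret
termination_by s.length - i
decreasing_by omega

def arrayPairSum (nums : List Int) : Int :=
  let s := PySem.List.sorted nums (fun x => x) false
  pvAWhile s 0 0

-- ===== PORT B =====
def arrayPairSum_alt (nums : List Int) : Int :=
  let counts := nums.foldl (fun d x => d.insert x (d.getD x 0 + 1)) PySem.Dict.empty
  let r := (PySem.List.sorted counts.keys (fun v => v) false).foldl
      (fun (st : Int × Int) v =>
        let c := counts.getD v 0
        let evens := PySem.Int.floordiv (c + (if PySem.Int.mod st.2 2 = 0 then 1 else 0)) 2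
        (st.1 + v * evens, st.2 + c))
      (0, 0)
  r.1

-- ===== PRECONDITION & SPEC =====
def Spec_arrayPairSum (nums : List Int) (out : Int) : Prop := out = arrayPairSum_alt nums
instance (nums : List Int) (out : Int) : Decidable (Spec_arrayPairSum nums out) := by unfold Spec_arrayPairSum; infer_instance

-- ===== CLAIM (what is proved, stated in full; the proofs are below) =====
def Claim_equal_arrayPairSum : Prop := ∀ (nums : List Int), Dom_arrayPairSum nums → Spec_arrayPairSum nums (arrayPairSum nums)

-- ===== LEMMAS AND PROOFS =====

-- sum of the elements at the "true" parity positions (position 0 counts iff the flag is true)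
def pvG : Bool → List Int → Int
  | _, [] => 0
  | true, a :: t => a + pvG false t
  | false, _ :: t => pvG true t

lemma pvAWhile_eq (s : List Int) :
    ∀ k i ret, s.length - i ≤ k → pvAWhile s ret i = ret + pvG true (s.drop i) := by
  intro k
  induction k with
  | zero =>
    intro i ret h
    rw [pvAWhile]
    have hge : ¬ i < s.length := by omega
    rw [dif_neg hge, List.drop_eq_nil_of_le (by omega)]
    simp [pvG]
  | succ k ih =>
    intro i ret h
    rw [pvAWhile]
    by_cases hi : i < s.length
    · rw [dif_pos hi, ih (i + 2) _ (by omega)]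
      have hdrop : s.drop i = s[i] :: s.drop (i + 1) := List.drop_eq_getElem_cons hi
      have h2 : s.drop (i + 2) = (s.drop (i + 1)).drop 1 := by
        rw [List.drop_drop]
      cases hd1 : s.drop (i + 1) with
      | nil => rw [hdrop, hd1, h2, hd1]; simp [pvG]; try ring
      | cons b t => rw [hdrop, hd1, h2, hd1]; simp [pvG]; try ring
    · rw [dif_neg hi, List.drop_eq_nil_of_le (by omega)]
      simp [pvG]

lemma pvG_replicate (v : Int) (rest : List Int) :
    ∀ (c : Nat) (b : Bool),
      pvG b (List.replicate c v ++ rest)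
        = v * ((if b then (c + 1) / 2 else c / 2 : Nat) : Int)
          + pvG (if c % 2 = 0 then b else !b) rest := by
  intro c
  induction c with
  | zero => intro b; cases b <;> simp
  | succ c ih =>
    intro b
    rw [List.replicate_succ, List.cons_append]
    rcases Nat.mod_two_eq_zero_or_one c with hc | hc <;> cases b <;>
      simp [pvG, ih, hc, Nat.succ_mod_two_eq_zero_iff] <;>
      · have h2 : ((c : Int) + 1 + 1) / 2 = (c : Int) / 2 + 1 := by omega
        rw [h2]; ring

lemma pvCountFlat (ks l : List Int) (hnd : ks.Nodup) (w : Int) :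
    (ks.flatMap fun v => List.replicate (l.count v) v).count w
      = if w ∈ ks then l.count w else 0 := by
  induction ks with
  | nil => simp
  | cons v ks ih =>
    rcases List.nodup_cons.mp hnd with ⟨hv, hnd'⟩
    rw [List.flatMap_cons, List.count_append, List.count_replicate, ih hnd']
    by_cases hw : w = v
    · subst hw
      simp [hv]
    · simp [hw, Ne.symm hw]

lemma pvPermFlat (ks l : List Int) (hnd : ks.Nodup) (hmem : ∀ v, v ∈ ks ↔ v ∈ l) :
    (ks.flatMap fun v => List.replicate (l.count v) v).Perm l := by
  rw [List.perm_iff_count]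
  intro w
  rw [pvCountFlat ks l hnd w]
  by_cases hw : w ∈ ks
  · simp [hw]
  · have : w ∉ l := fun h => hw ((hmem w).mpr h)
    simp [hw, List.count_eq_zero.mpr this]

lemma pvPairwiseFlat (ks l : List Int) (hp : ks.Pairwise (· < ·)) :
    (ks.flatMap fun v => List.replicate (l.count v) v).Pairwise (· ≤ ·) := by
  induction ks with
  | nil => simp
  | cons v ks ih =>
    rcases List.pairwise_cons.mp hp with ⟨hv, hp'⟩
    rw [List.flatMap_cons]
    apply List.pairwise_append.mpr
    refine ⟨List.pairwise_replicate.mpr (Or.inr le_rfl), ih hp', ?_⟩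
    intro a ha b hb
    rcases List.mem_flatMap.mp hb with ⟨u, hu, hbu⟩
    rw [List.eq_of_mem_replicate ha, List.eq_of_mem_replicate hbu]
    exact le_of_lt (hv u hu)

lemma pvBfold (l : List Int) :
    ∀ (ks : List Int) (total : Int) (n : Nat),
      (ks.foldl
          (fun (st : Int × Int) v =>
            (st.1 + v * PySem.Int.floordiv ((l.count v : Int)
                  + (if PySem.Int.mod st.2 2 = 0 then 1 else 0)) 2,
             st.2 + (l.count v : Int)))
          (total, (n : Int))).1
        = total + pvG (decide (n % 2 = 0)) (ks.flatMap fun v => List.replicate (l.count v) v) := by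
  intro ks
  induction ks with
  | nil => intro total n; simp [pvG]
  | cons v ks ih =>
    intro total n
    rw [List.foldl_cons, List.flatMap_cons]
    have hcast : (n : Int) + (l.count v : Int) = ((n + l.count v : Nat) : Int) := by push_cast; ring
    rw [show ((total, (n : Int)) : Int × Int).2 = (n : Int) from rfl] at *
    simp only [hcast]
    rw [ih, pvG_replicate]
    rcases Nat.mod_two_eq_zero_or_one n with hn | hn <;>
      rcases Nat.mod_two_eq_zero_or_one (l.count v) with hc | hc <;>
      · have hpar : (n + l.count v) % 2 = (n % 2 + l.count v % 2) % 2 := Nat.add_mod n (l.count v) 2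
        rw [hpar, hn, hc]
        have hmod : PySem.Int.mod (n : Int) 2 = ((n % 2 : Nat) : Int) := PySem.Int.mod_natCast n 2
        rw [hmod, hn]
        norm_num
        ring

lemma pvSortedFlat (nums : List Int) :
    PySem.List.sorted nums (fun x => x) false
      = (PySem.List.sorted (PySem.Set.ofList nums) (fun v => v) false).flatMap
          (fun v => List.replicate (nums.count v) v) := by
  set ks := PySem.List.sorted (PySem.Set.ofList nums) (fun v => v) false with hks
  have hperm : ks.Perm (PySem.Set.ofList nums) := PySem.List.sorted_perm _ _ _
  have hnd : ks.Nodup := hperm.nodup_iff.mpr (PySem.Set.nodup_ofList nums)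
  have hmem : ∀ v, v ∈ ks ↔ v ∈ nums := by
    intro v
    rw [hperm.mem_iff, PySem.Set.mem_ofList]
  have hlt : ks.Pairwise (· < ·) := PySem.List.sorted_ofList_pairwise_lt nums
  exact PySem.List.sorted_id_eq_of_perm_of_pairwise _ _
    (pvPermFlat ks nums hnd hmem) (pvPairwiseFlat ks nums hlt)

-- ===== VERDICT (by name: the statement is the Claim_ definition above) =====
theorem arrayPairSum_spec : Claim_equal_arrayPairSum := by
  intro nums _
  unfold Spec_arrayPairSum arrayPairSum arrayPairSum_alt
  simp only [PySem.Dict.getD_foldl_insert_add_one, PySem.Dict.getD_empty, zero_add,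
    PySem.Dict.keys_foldl_insert, PySem.Dict.keys_empty, PySem.Set.update_nil_left]
  rw [show ((0 : Int), (0 : Int)) = ((0 : Int), ((0 : Nat) : Int)) by norm_num]
  rw [pvBfold nums _ 0 0, pvAWhile_eq _ (PySem.List.sorted nums (fun x => x) false).length 0 0 (by omega)]
  simp only [List.drop_zero, Nat.zero_mod, zero_add]
  rw [pvSortedFlat nums]
  norm_num
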